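-- pv_equiv track=rewrite | github.com/caminante-blanco/soosl-extras | components/component_type.py | possibleCatCodes
-- ===== SOURCE A (Python) =====
-- def possibleCatCodes(category): #not all codes in range are used
--     if category == 'handshape':
--         return [i for i in list(range(256, 517))]
--     elif category == 'facehead':
--         return [i for i in list(range(767, 880))]
--     elif category == 'signtype':
--         return [i for i in list(range(4096, 4112))]
--     elif category == 'changenature':
--         return [i for i in list(range(4112, 4128))]
--     elif category == 'changelocation':
--         return [i for i in list(range(4128, 4136))]
--     elif category == 'changemanner':
--         return [i for i in list(range(4136, 4144))]
--     elif category == 'contact':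
--         return [i for i in list(range(4144, 4160))]
-- # reference only; see location_widget.py
--     elif category == 'location':
--         return [i for i in list(range(1280, 4095))]
--     else:
--         return []
-- ===== SOURCE B (Python) =====
-- # Inverse mapping: classify each code into its category, then filter the whole code space.
-- _SEGMENTS = [
--     (256, 517, 'handshape'),
--     (767, 880, 'facehead'),
--     (1280, 4095, 'location'),
--     (4096, 4112, 'signtype'),
--     (4112, 4128, 'changenature'),
--     (4128, 4136, 'changelocation'),
--     (4136, 4144, 'changemanner'),
--     (4144, 4160, 'contact'),
-- ]
--
-- def _codeCategory(code):
--     for start, stop, name in _SEGMENTS: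
--         if start <= code < stop:
--             return name
--     return None
--
-- def possibleCatCodes(category): #not all codes in range are used
--     return [code for code in range(4160) if _codeCategory(code) == category]
-- ===== Notes on version B (the rewrite author's own statement) =====
-- stated objective: alternative
-- what changed: Inverts the mapping: instead of an if/elif cascade returning a range per category, B defines a code->category classifier over a segment table and builds the result by filtering the whole code space range(4160) for codes whose category matches.
import Mathlib
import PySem

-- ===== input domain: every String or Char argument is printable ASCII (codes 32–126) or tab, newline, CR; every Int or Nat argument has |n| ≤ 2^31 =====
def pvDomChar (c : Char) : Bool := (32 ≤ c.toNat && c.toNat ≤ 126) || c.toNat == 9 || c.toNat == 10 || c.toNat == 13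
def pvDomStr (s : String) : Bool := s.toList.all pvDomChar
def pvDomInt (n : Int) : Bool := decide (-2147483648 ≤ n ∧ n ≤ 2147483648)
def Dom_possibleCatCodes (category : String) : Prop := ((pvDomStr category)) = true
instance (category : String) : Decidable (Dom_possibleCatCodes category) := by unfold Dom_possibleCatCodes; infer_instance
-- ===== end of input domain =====

-- B inverts the mapping: a code→category classifier over a segment table, filtering the full code space (alternative decomposition).


-- ===== PORT A =====
def possibleCatCodes (category : String) : List Int :=
  if category = "handshape" then (PySem.List.pyRange 256 517 1).map (fun i => i)
  else if category = "facehead" then (PySem.List.pyRange 767 880 1).map (fun i => i)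
  else if category = "signtype" then (PySem.List.pyRange 4096 4112 1).map (fun i => i)
  else if category = "changenature" then (PySem.List.pyRange 4112 4128 1).map (fun i => i)
  else if category = "changelocation" then (PySem.List.pyRange 4128 4136 1).map (fun i => i)
  else if category = "changemanner" then (PySem.List.pyRange 4136 4144 1).map (fun i => i)
  else if category = "contact" then (PySem.List.pyRange 4144 4160 1).map (fun i => i)
  else if category = "location" then (PySem.List.pyRange 1280 4095 1).map (fun i => i)
  else []

-- ===== PORT B =====
-- segment table: (start, stop, category name)
def segments : List (Int × Int × String) :=
  [(256, 517, "handshape"), (767, 880, "facehead"), (1280, 4095, "location"),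
   (4096, 4112, "signtype"), (4112, 4128, "changenature"), (4128, 4136, "changelocation"),
   (4136, 4144, "changemanner"), (4144, 4160, "contact")]

-- the `for … return name` loop of _codeCategory
def findSeg (segs : List (Int × Int × String)) (code : Int) : Option String :=
  match segs with
  | [] => none
  | (start, stop, name) :: rest =>
      if start ≤ code ∧ code < stop then some name else findSeg rest code

def codeCategory (code : Int) : Option String := findSeg segments code

def possibleCatCodes_alt (category : String) : List Int :=
  (PySem.List.pyRange 0 4160 1).filter (fun code =>
    match codeCategory code with
    | some n => n == category
    | none => false)

-- ===== PRECONDITION & SPEC =====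
def Spec_possibleCatCodes (category : String) (out : List Int) : Prop := out = possibleCatCodes_alt category
instance (category : String) (out : List Int) : Decidable (Spec_possibleCatCodes category out) := by unfold Spec_possibleCatCodes; infer_instance

-- ===== CLAIM (what is proved, stated in full; the proofs are below) =====
def Claim_equal_possibleCatCodes : Prop := ∀ (category : String), Dom_possibleCatCodes category → Spec_possibleCatCodes category (possibleCatCodes category)

-- ===== LEMMAS AND PROOFS =====

-- filtering the full code space by an interval predicate yields exactly that interval's range
theorem filter_interval (p : Int → Bool) (s t : Int) (hs : 0 ≤ s) (ht : t ≤ 4160)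
    (hp : ∀ x, p x = decide (s ≤ x ∧ x < t)) :
    (PySem.List.pyRange 0 4160 1).filter p = PySem.List.pyRange s t 1 := by
  have hperm : List.Perm ((PySem.List.pyRange 0 4160 1).filter p) (PySem.List.pyRange s t 1) := by
    rw [List.perm_ext_iff_of_nodup (List.Nodup.filter _ (PySem.List.nodup_pyRange_one 0 4160)) (PySem.List.nodup_pyRange_one s t)]
    intro x
    simp [List.mem_filter, PySem.List.mem_pyRange_one, hp]
    omega
  exact List.Perm.eq_of_pairwise (fun _ _ _ _ hab hba => absurd hba (lt_asymm hab))
    (List.Pairwise.filter _ (PySem.List.pairwise_lt_pyRange_one 0 4160)) (PySem.List.pairwise_lt_pyRange_one s t) hperm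

-- the classifier's match against "handshape" tests exactly membership in [256, 517)
theorem pw_handshape : ∀ x : Int, (match codeCategory x with | some n => n == "handshape" | none => false) = decide (256 ≤ x ∧ x < 517) := by
  intro x; simp [codeCategory, segments, findSeg]; split_ifs <;> simp_all

-- the classifier's match against "facehead" tests exactly membership in [767, 880)
theorem pw_facehead : ∀ x : Int, (match codeCategory x with | some n => n == "facehead" | none => false) = decide (767 ≤ x ∧ x < 880) := by
  intro x; simp [codeCategory, segments, findSeg]; split_ifs <;> simp_all <;> omega

-- the classifier's match against "signtype" tests exactly membership in [4096, 4112)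
theorem pw_signtype : ∀ x : Int, (match codeCategory x with | some n => n == "signtype" | none => false) = decide (4096 ≤ x ∧ x < 4112) := by
  intro x; simp [codeCategory, segments, findSeg]; split_ifs <;> simp_all <;> omega

-- the classifier's match against "changenature" tests exactly membership in [4112, 4128)
theorem pw_changenature : ∀ x : Int, (match codeCategory x with | some n => n == "changenature" | none => false) = decide (4112 ≤ x ∧ x < 4128) := by
  intro x; simp [codeCategory, segments, findSeg]; split_ifs <;> simp_all <;> omega

-- the classifier's match against "changelocation" tests exactly membership in [4128, 4136)
theorem pw_changelocation : ∀ x : Int, (match codeCategory x with | some n => n == "changelocation" | none => false) = decide (4128 ≤ x ∧ x < 4136) := by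
  intro x; simp [codeCategory, segments, findSeg]; split_ifs <;> simp_all <;> omega

-- the classifier's match against "changemanner" tests exactly membership in [4136, 4144)
theorem pw_changemanner : ∀ x : Int, (match codeCategory x with | some n => n == "changemanner" | none => false) = decide (4136 ≤ x ∧ x < 4144) := by
  intro x; simp [codeCategory, segments, findSeg]; split_ifs <;> simp_all <;> omega

-- the classifier's match against "contact" tests exactly membership in [4144, 4160)
theorem pw_contact : ∀ x : Int, (match codeCategory x with | some n => n == "contact" | none => false) = decide (4144 ≤ x ∧ x < 4160) := by
  intro x; simp [codeCategory, segments, findSeg]; split_ifs <;> simp_all <;> omega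

-- the classifier's match against "location" tests exactly membership in [1280, 4095)
theorem pw_location : ∀ x : Int, (match codeCategory x with | some n => n == "location" | none => false) = decide (1280 ≤ x ∧ x < 4095) := by
  intro x; simp [codeCategory, segments, findSeg]; split_ifs <;> simp_all <;> omega

-- ===== VERDICT (by name: the statement is the Claim_ definition above) =====
theorem possibleCatCodes_spec : Claim_equal_possibleCatCodes := by
  intro category _
  unfold Spec_possibleCatCodes possibleCatCodes possibleCatCodes_alt
  by_cases h1 : category = "handshape"
  · subst h1; simp only [String.reduceEq, reduceIte, List.map_id']
    exact (filter_interval _ 256 517 (by norm_num) (by norm_num) pw_handshape).symm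
  by_cases h2 : category = "facehead"
  · subst h2; simp only [String.reduceEq, reduceIte, List.map_id']
    exact (filter_interval _ 767 880 (by norm_num) (by norm_num) pw_facehead).symm
  by_cases h3 : category = "signtype"
  · subst h3; simp only [String.reduceEq, reduceIte, List.map_id']
    exact (filter_interval _ 4096 4112 (by norm_num) (by norm_num) pw_signtype).symm
  by_cases h4 : category = "changenature"
  · subst h4; simp only [String.reduceEq, reduceIte, List.map_id']
    exact (filter_interval _ 4112 4128 (by norm_num) (by norm_num) pw_changenature).symm
  by_cases h5 : category = "changelocation"
  · subst h5; simp only [String.reduceEq, reduceIte, List.map_id']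
    exact (filter_interval _ 4128 4136 (by norm_num) (by norm_num) pw_changelocation).symm
  by_cases h6 : category = "changemanner"
  · subst h6; simp only [String.reduceEq, reduceIte, List.map_id']
    exact (filter_interval _ 4136 4144 (by norm_num) (by norm_num) pw_changemanner).symm
  by_cases h7 : category = "contact"
  · subst h7; simp only [String.reduceEq, reduceIte, List.map_id']
    exact (filter_interval _ 4144 4160 (by norm_num) (by norm_num) pw_contact).symm
  by_cases h8 : category = "location"
  · subst h8; simp only [String.reduceEq, reduceIte, List.map_id']
    exact (filter_interval _ 1280 4095 (by norm_num) (by norm_num) pw_location).symm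
  · simp only [if_neg h1, if_neg h2, if_neg h3, if_neg h4, if_neg h5, if_neg h6, if_neg h7, if_neg h8]
    symm
    rw [List.filter_eq_nil_iff]
    intro code _
    simp [codeCategory, segments, findSeg]
    split_ifs <;> simp_all [Ne.symm]
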